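-- pv_equiv track=rewrite | github.com/General-zzz-trade/quant_system | scripts/train_v3_walkforward.py | expanding_window_folds
-- ===== SOURCE A (Python) =====
-- def expanding_window_folds(n: int, n_folds: int = 5, min_train: int = 500):
--     """Generate expanding-window fold indices.
--
--     Each fold: train = [0, split), test = [split, split + fold_size).
--     Train expands; test windows are non-overlapping.
--     """
--     test_total = n - min_train
--     if test_total <= 0 or n_folds <= 0:
--         return []
--     fold_size = test_total // n_folds
--     if fold_size < 50:
--         return []
--     folds = []
--     for i in range(n_folds):
--         test_start = min_train + i * fold_size
--         test_end = test_start + fold_size if i < n_folds - 1 else n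
--         folds.append((0, test_start, test_start, test_end))
--     return folds
-- ===== SOURCE B (Python) =====
-- def expanding_window_folds(n: int, n_folds: int = 5, min_train: int = 500):
--     test_total = n - min_train
--     if test_total <= 0 or n_folds <= 0:
--         return []
--     fold_size = test_total // n_folds
--     if fold_size < 50:
--         return []
--
--     def build(i, end):
--         # folds 0..i, where fold i's test window ends at `end`;
--         # each earlier fold's end is the next fold's start, threaded down.
--         start = min_train + i * fold_size
--         fold = (0, start, start, end)
--         if i == 0:
--             return [fold]
--         return build(i - 1, start) + [fold]
--
--     return build(n_folds - 1, n)
-- ===== Notes on version B (the rewrite author's own statement) =====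
-- stated objective: alternative
-- what changed: B builds the fold list recursively back-to-front: the last fold gets endpoint n and each recursive step threads the current fold's start down as the previous fold's endpoint, so A's per-iteration last-fold conditional disappears entirely.
import Mathlib
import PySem

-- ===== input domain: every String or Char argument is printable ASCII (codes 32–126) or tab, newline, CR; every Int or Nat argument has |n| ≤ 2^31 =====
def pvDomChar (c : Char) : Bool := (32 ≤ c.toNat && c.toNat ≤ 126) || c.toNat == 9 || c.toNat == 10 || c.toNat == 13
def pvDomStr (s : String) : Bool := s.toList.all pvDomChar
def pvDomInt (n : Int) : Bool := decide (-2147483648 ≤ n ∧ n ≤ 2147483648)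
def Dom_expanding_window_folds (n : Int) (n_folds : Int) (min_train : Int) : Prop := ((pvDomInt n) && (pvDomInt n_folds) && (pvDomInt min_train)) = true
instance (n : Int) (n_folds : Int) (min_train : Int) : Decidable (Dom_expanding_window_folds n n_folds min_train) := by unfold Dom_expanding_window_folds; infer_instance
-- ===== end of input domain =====

-- B constructs the folds recursively back-to-front, threading each fold's start
-- down as the previous fold's endpoint, instead of A's forward loop with a
-- per-iteration last-fold conditional (alternative decomposition, same cost).

-- ===== PORT A =====
def expanding_window_folds (n : Int) (n_folds : Int) (min_train : Int) : List (Int × Int × Int × Int) :=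
  let test_total := n - min_train
  if test_total ≤ 0 ∨ n_folds ≤ 0 then []
  else
    let fold_size := PySem.Int.floordiv test_total n_folds
    if fold_size < 50 then []
    else
      (PySem.List.pyRange 0 n_folds 1).foldl (fun folds i =>
        let test_start := min_train + i * fold_size
        let test_end := if i < n_folds - 1 then test_start + fold_size else n
        folds ++ [(0, test_start, test_start, test_end)]) []

-- ===== PORT B =====
-- recursive helper `build(i, end)` from Source B; i ported as a Nat counter
def buildFolds (min_train fold_size : Int) : Nat → Int → List (Int × Int × Int × Int)
  | 0, e => [(0, min_train, min_train, e)]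
  | i + 1, e =>
      let start := min_train + ((i : Int) + 1) * fold_size
      buildFolds min_train fold_size i start ++ [(0, start, start, e)]

def expanding_window_folds_alt (n : Int) (n_folds : Int) (min_train : Int) : List (Int × Int × Int × Int) :=
  let test_total := n - min_train
  if test_total ≤ 0 ∨ n_folds ≤ 0 then []
  else
    let fold_size := PySem.Int.floordiv test_total n_folds
    if fold_size < 50 then []
    else
      buildFolds min_train fold_size (n_folds - 1).toNat n

-- ===== PRECONDITION & SPEC =====
def Spec_expanding_window_folds (n : Int) (n_folds : Int) (min_train : Int) (out : List (Int × Int × Int × Int)) : Prop := out = expanding_window_folds_alt n n_folds min_train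
instance (n : Int) (n_folds : Int) (min_train : Int) (out : List (Int × Int × Int × Int)) : Decidable (Spec_expanding_window_folds n n_folds min_train out) := by unfold Spec_expanding_window_folds; infer_instance

-- ===== CLAIM =====
def Claim_equal_expanding_window_folds : Prop := ∀ (n : Int) (n_folds : Int) (min_train : Int), Dom_expanding_window_folds n n_folds min_train → Spec_expanding_window_folds n n_folds min_train (expanding_window_folds n n_folds min_train)

-- ===== LEMMAS AND PROOFS =====

-- characterisation of the back-to-front recursion as a map over indices
theorem buildFolds_eq_map (mt fs : Int) (i : Nat) (e : Int) :
    buildFolds mt fs i e = (List.range (i + 1)).map (fun (k : Nat) =>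
      ((0 : Int), mt + (k : Int) * fs, mt + (k : Int) * fs,
        if k < i then mt + (k : Int) * fs + fs else e)) := by
  induction i generalizing e with
  | zero => simp [buildFolds]
  | succ i ih =>
    rw [buildFolds, ih, List.range_succ (n := i + 1), List.map_append]
    congr 1
    · apply List.map_congr_left
      intro k hk
      have hk' : k < i + 1 := List.mem_range.mp hk
      have h2 : k < i + 1 := hk'
      by_cases hc : k < i
      · simp [hc, h2]
      · have hki : k = i := by omega
        subst hki
        simp only [hc, if_false, h2, if_true]
        ring_nf
    · simp

-- ===== VERDICT =====
theorem expanding_window_folds_spec : Claim_equal_expanding_window_folds := by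
  intro n n_folds min_train _
  unfold Spec_expanding_window_folds expanding_window_folds expanding_window_folds_alt
  by_cases h1 : n - min_train ≤ 0 ∨ n_folds ≤ 0
  · rw [if_pos h1, if_pos h1]
  · rw [if_neg h1, if_neg h1]
    by_cases h2 : PySem.Int.floordiv (n - min_train) n_folds < 50
    · rw [if_pos h2, if_pos h2]
    · rw [if_neg h2, if_neg h2]
      have hf : 0 < n_folds := by omega
      rw [PySem.List.foldl_append_singleton_eq_map, PySem.List.pyRange_one,
        buildFolds_eq_map, List.map_map, List.nil_append]
      have hi : (n_folds - 1).toNat + 1 = (n_folds - 0).toNat := by omega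
      rw [hi]
      apply List.map_congr_left
      intro k hk
      have hk' : k < (n_folds - 0).toNat := List.mem_range.mp hk
      have hcond : ((0 : Int) + (k : Int) < n_folds - 1) ↔ (k < (n_folds - 1).toNat) := by omega
      simp only [Function.comp, zero_add]
      by_cases hc : (k : Int) < n_folds - 1
      · rw [if_pos hc, if_pos (by omega : k < (n_folds - 1).toNat)]
      · rw [if_neg hc, if_neg (by omega : ¬ k < (n_folds - 1).toNat)]
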